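-- pv_equiv track=rewrite | github.com/gx-ai-architect/e-commerce-industry-research | scripts/bridge/packets_to_evidence.py | group_by_question
-- ===== SOURCE A (Python) =====
-- def group_by_question(entries):
--     """Group entries by question_id for industry-mode output."""
--     grouped = {}
--     ungrouped = []
--
--     for entry in entries:
--         qid = entry.get("question_id")
--         if qid:
--             if qid not in grouped:
--                 grouped[qid] = []
--             grouped[qid].append(entry)
--         else:
--             ungrouped.append(entry)
--
--     # Return entries ordered by question_id, then ungrouped
--     result = []
--     for qid in sorted(grouped.keys()):
--         result.extend(grouped[qid])
--     result.extend(ungrouped)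
--
--     return result
-- ===== SOURCE B (Python) =====
-- def group_by_question(entries):
--     """Group entries by question_id for industry-mode output."""
--     qids = sorted({e["question_id"] for e in entries if e.get("question_id")})
--     result = [e for q in qids for e in entries if e.get("question_id") == q]
--     result += [e for e in entries if not e.get("question_id")]
--     return result
-- ===== Notes on version B (the rewrite author's own statement) =====
-- stated objective: simpler
-- what changed: Replaces A's dict-of-lists accumulation plus sorted-keys concatenation with three comprehensions: sort the distinct truthy question_ids, emit one filter pass over the entries per qid, then append the entries with a falsy/missing question_id; no dict is maintained.
import Mathlib
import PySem

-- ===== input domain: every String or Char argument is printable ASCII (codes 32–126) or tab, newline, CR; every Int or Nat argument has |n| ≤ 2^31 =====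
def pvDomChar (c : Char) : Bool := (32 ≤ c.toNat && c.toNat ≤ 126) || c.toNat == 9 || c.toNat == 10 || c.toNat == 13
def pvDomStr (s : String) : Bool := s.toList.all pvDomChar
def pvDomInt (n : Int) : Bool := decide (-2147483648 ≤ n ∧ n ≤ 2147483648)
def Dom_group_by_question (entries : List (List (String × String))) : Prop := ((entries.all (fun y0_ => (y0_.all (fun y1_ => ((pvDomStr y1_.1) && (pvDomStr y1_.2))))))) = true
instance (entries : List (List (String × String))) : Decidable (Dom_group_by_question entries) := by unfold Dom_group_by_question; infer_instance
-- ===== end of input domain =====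

-- B replaces A's dict-grouping with: sorted distinct qids, one filter pass per qid, then the
-- falsy-qid entries — no dict is maintained (objective: simpler; not claimed faster).

-- shared primitive helpers: entry.get("question_id") and Python truthiness of the result
def pyGetQ (entry : List (String × String)) : Option String :=
  (PySem.Dict.mk entry).get? "question_id"

def pyQv (entry : List (String × String)) : String := (pyGetQ entry).getD ""

def pyTruthy (entry : List (String × String)) : Bool := pyQv entry != ""

-- ===== PORT A =====
-- the loop body of A's single pass (grouped dict, ungrouped list)
def pvStepA (st : PySem.Dict String (List (List (String × String))) × List (List (String × String)))
    (entry : List (String × String)) :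
    PySem.Dict String (List (List (String × String))) × List (List (String × String)) :=
  if pyTruthy entry then
    let qid := pyQv entry
    let g := if st.1.contains qid then st.1 else st.1.insert qid []
    (g.modify qid [] (fun l => l ++ [entry]), st.2)
  else
    (st.1, st.2 ++ [entry])

def group_by_question (entries : List (List (String × String))) : List (List (String × String)) :=
  let st := entries.foldl pvStepA (PySem.Dict.empty, [])
  let result := (PySem.List.sorted st.1.keys (fun q => q) false).foldl
    (fun r q => r ++ st.1.getD q []) []
  result ++ st.2

-- ===== PORT B =====
def group_by_question_alt (entries : List (List (String × String))) : List (List (String × String)) :=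
  let qids := PySem.List.sorted (PySem.Set.ofList ((entries.filter pyTruthy).map pyQv)) (fun q => q) false
  let result := qids.flatMap (fun q => entries.filter (fun e => pyGetQ e == some q))
  result ++ entries.filter (fun e => !pyTruthy e)

-- ===== PRECONDITION & SPEC =====
def Spec_group_by_question (entries : List (List (String × String))) (out : List (List (String × String))) : Prop := out = group_by_question_alt entries
instance (entries : List (List (String × String))) (out : List (List (String × String))) : Decidable (Spec_group_by_question entries out) := by unfold Spec_group_by_question; infer_instance

-- ===== CLAIM (what is proved, stated in full; the proofs are below) =====
def Claim_equal_group_by_question : Prop := ∀ (entries : List (List (String × String))), Dom_group_by_question entries → Spec_group_by_question entries (group_by_question entries)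

-- ===== LEMMAS AND PROOFS =====

-- the distinct truthy qids of a prefix, in first-appearance order
def pvQset (p : List (List (String × String))) : PySem.Set String :=
  PySem.Set.ofList ((p.filter pyTruthy).map pyQv)

lemma pvQset_ne_empty {p : List (List (String × String))} {q : String} (h : q ∈ pvQset p) : q ≠ "" := by
  rcases (PySem.Set.mem_ofList _ _).1 h with hm
  rcases List.mem_map.1 hm with ⟨e, he, rfl⟩
  have ht := (List.mem_filter.1 he).2
  simpa [pyTruthy] using ht

lemma pvGetQ_of_truthy {e : List (String × String)} (h : pyTruthy e = true) : pyGetQ e = some (pyQv e) := by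
  unfold pyTruthy pyQv at *
  cases hq : pyGetQ e with
  | none => simp [hq] at h
  | some s => simp

lemma pvMem_qset_of_getQ {p : List (List (String × String))} {e : List (String × String)} {v : String}
    (he : e ∈ p) (hv : pyGetQ e = some v) (hne : v ≠ "") : v ∈ pvQset p := by
  have ht : pyTruthy e = true := by simp [pyTruthy, pyQv, hv, hne]
  have hqv : pyQv e = v := by simp [pyQv, hv]
  exact (PySem.Set.mem_ofList _ _).2 (List.mem_map.2 ⟨e, List.mem_filter.2 ⟨he, ht⟩, hqv⟩)

lemma pvFilter_eq_nil {p : List (List (String × String))} {v : String}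
    (hv : v ∉ pvQset p) (hne : v ≠ "") :
    p.filter (fun e => pyGetQ e == some v) = [] := by
  apply List.filter_eq_nil_iff.2
  intro e he
  simp only [beq_iff_eq]
  intro hq
  exact hv (pvMem_qset_of_getQ he hq hne)

-- the invariant of A's pass
lemma pvFoldA_inv (p : List (List (String × String))) :
    (p.foldl pvStepA (PySem.Dict.empty, [])).1.keys = pvQset p
    ∧ (∀ q ∈ pvQset p, (p.foldl pvStepA (PySem.Dict.empty, [])).1.getD q []
        = p.filter (fun e => pyGetQ e == some q))
    ∧ (p.foldl pvStepA (PySem.Dict.empty, [])).2 = p.filter (fun e => !pyTruthy e) := by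
  induction p using List.reverseRecOn with
  | nil => refine ⟨by simp [pvQset, PySem.Dict.keys_empty, PySem.Set.ofList], by simp [pvQset, PySem.Set.ofList], by simp⟩
  | append_singleton p a ih =>
    obtain ⟨hk, hg, hu⟩ := ih
    rw [List.foldl_append, List.foldl_cons, List.foldl_nil]
    set st := p.foldl pvStepA (PySem.Dict.empty, []) with hst
    by_cases ht : pyTruthy a = true
    · have hq : pyGetQ a = some (pyQv a) := pvGetQ_of_truthy ht
      have hqne : pyQv a ≠ "" := by simpa [pyTruthy] using ht
      have hqset : pvQset (p ++ [a]) = (pvQset p).add (pyQv a) := by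
        simp [pvQset, List.filter_append, ht, PySem.Set.ofList_append_singleton]
      have hcont : st.1.contains (pyQv a) = true ↔ pyQv a ∈ pvQset p := by
        rw [PySem.Dict.contains_iff_mem_keys, hk]
      refine ⟨?_, ?_, ?_⟩
      · -- keys
        by_cases hm : pyQv a ∈ pvQset p
        · have hc : st.1.contains (pyQv a) = true := hcont.2 hm
          simp only [pvStepA, ht, hc, ↓reduceIte]
          rw [PySem.Dict.keys_modify, PySem.Dict.keys_insert_of_contains _ _ hc, hk, hqset,
            PySem.Set.add_of_mem hm]
        · have hc : st.1.contains (pyQv a) = false := by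
            cases hcv : st.1.contains (pyQv a) with
            | true => exact absurd (hcont.1 hcv) hm
            | false => rfl
          simp only [pvStepA, ht, if_pos, hc, if_false, Bool.false_eq_true]
          rw [PySem.Dict.keys_modify, PySem.Dict.keys_insert_of_contains _ _
              (PySem.Dict.contains_insert_self _ _ _),
            PySem.Dict.keys_insert_of_not_contains _ _ hc, hk, hqset,
            PySem.Set.add_of_not_mem hm]
      · -- getD
        intro q hqmem
        rw [hqset] at hqmem
        by_cases hqv : q = pyQv a
        · by_cases hc : st.1.contains (pyQv a) = true
          · have hm : pyQv a ∈ pvQset p := hcont.1 hc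
            simp only [pvStepA, ht, hc, ↓reduceIte]
            rw [PySem.Dict.getD_modify, if_pos hqv, hg _ hm, List.filter_append, hqv]
            simp [hq]
          · have hc' : st.1.contains (pyQv a) = false := by
              cases hcv : st.1.contains (pyQv a) with
              | true => exact absurd hcv hc
              | false => rfl
            have hm : pyQv a ∉ pvQset p := fun hmm => hc (hcont.2 hmm)
            simp only [pvStepA, ht, if_pos, hc', if_false, Bool.false_eq_true]
            rw [PySem.Dict.getD_modify, if_pos hqv, PySem.Dict.getD_insert, if_pos rfl,
              List.filter_append, hqv, pvFilter_eq_nil hm hqne]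
            simp [hq]
        · have hqp : q ∈ pvQset p := by
            rcases (PySem.Set.mem_add _ _ _).1 hqmem with h | h
            · exact h
            · exact absurd h hqv
          simp only [pvStepA, ht, if_pos]
          by_cases hc : st.1.contains (pyQv a) = true
          · simp only [hc, ↓reduceIte]
            rw [PySem.Dict.getD_modify, if_neg hqv, hg q hqp, List.filter_append]
            simp [hq, Ne.symm hqv]
          · have hc' : st.1.contains (pyQv a) = false := by
              cases hcv : st.1.contains (pyQv a) with
              | true => exact absurd hcv hc
              | false => rfl
            simp only [hc', Bool.false_eq_true, if_false]
            rw [PySem.Dict.getD_modify, if_neg hqv, PySem.Dict.getD_insert, if_neg hqv,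
              hg q hqp, List.filter_append]
            simp [hq, Ne.symm hqv]
      · -- ungrouped
        simp only [pvStepA, ht, if_pos]
        rw [hu, List.filter_append]
        simp [ht]
    · -- falsy a
      have ht' : pyTruthy a = false := by simpa using ht
      have hqa : pyGetQ a = none ∨ pyGetQ a = some "" := by
        unfold pyTruthy pyQv at ht'
        cases hq : pyGetQ a with
        | none => exact Or.inl rfl
        | some s => right; simp [hq] at ht'; simp [ht']
      have hqset : pvQset (p ++ [a]) = pvQset p := by
        simp [pvQset, List.filter_append, ht']
      refine ⟨?_, ?_, ?_⟩
      · simp only [pvStepA, ht', Bool.false_eq_true, if_false]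
        rw [hk, hqset]
      · intro q hqmem
        rw [hqset] at hqmem
        have hqne := pvQset_ne_empty hqmem
        simp only [pvStepA, ht', Bool.false_eq_true, if_false]
        rw [hg q hqmem, List.filter_append]
        have : (pyGetQ a == some q) = false := by
          rcases hqa with h | h <;> simp [h, Ne.symm hqne]
        simp [this]
      · simp only [pvStepA, ht', Bool.false_eq_true, if_false]
        rw [hu, List.filter_append]
        simp [ht']

lemma pvFlatMap_congr {α β : Type} (l : List α) (f g : α → List β)
    (h : ∀ x ∈ l, f x = g x) : l.flatMap f = l.flatMap g := by
  induction l with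
  | nil => rfl
  | cons x xs ih =>
    simp only [List.flatMap_cons, h x (List.mem_cons_self), ih (fun y hy => h y (List.mem_cons_of_mem _ hy))]

-- ===== VERDICT (by name: the statement is the Claim_ definition above) =====
theorem group_by_question_spec : Claim_equal_group_by_question := by
  intro entries _
  unfold Spec_group_by_question group_by_question group_by_question_alt
  obtain ⟨hk, hg, hu⟩ := pvFoldA_inv entries
  simp only []
  rw [PySem.List.foldl_append_eq_flatMap, List.nil_append, hk, hu]
  congr 1
  apply pvFlatMap_congr
  intro q hqmem
  exact hg q ((PySem.List.mem_sorted _ _ _ _).1 hqmem)
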